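-- pv_equiv track=rewrite | github.com/PaulKVCare/advent-of-code-2025 | paul-kamphuis/day10/solveB.py | estimate_probability
-- ===== SOURCE A (Python) =====
-- def estimate_probability(available_buttons, target_voltage):
--     s = [btn for btn, count in available_buttons.items() if count > 0]
--     probs = {}
--     for i in range(len(target_voltage)):
--         counter = 0
--         for btn in s:
--             if i in btn:
--                 counter += 1
--         probs[i] = counter
--     return probs
-- ===== SOURCE B (Python) =====
-- def estimate_probability(available_buttons, target_voltage):
--     V = len(target_voltage)
--     counts = [0] * V
--     for btn, count in available_buttons.items():
--         if count > 0:
--             for e in dict.fromkeys(btn):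
--                 if 0 <= e < V:
--                     counts[e] += 1
--     return {i: c for i, c in enumerate(counts)}
-- ===== Notes on version B (the rewrite author's own statement) =====
-- stated objective: faster
-- what changed: B inverts the loop nesting: instead of scanning every active button for each voltage index, it makes a single pass over the buttons incrementing a counts array at each distinct in-range element, then emits enumerate(counts).
import Mathlib
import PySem

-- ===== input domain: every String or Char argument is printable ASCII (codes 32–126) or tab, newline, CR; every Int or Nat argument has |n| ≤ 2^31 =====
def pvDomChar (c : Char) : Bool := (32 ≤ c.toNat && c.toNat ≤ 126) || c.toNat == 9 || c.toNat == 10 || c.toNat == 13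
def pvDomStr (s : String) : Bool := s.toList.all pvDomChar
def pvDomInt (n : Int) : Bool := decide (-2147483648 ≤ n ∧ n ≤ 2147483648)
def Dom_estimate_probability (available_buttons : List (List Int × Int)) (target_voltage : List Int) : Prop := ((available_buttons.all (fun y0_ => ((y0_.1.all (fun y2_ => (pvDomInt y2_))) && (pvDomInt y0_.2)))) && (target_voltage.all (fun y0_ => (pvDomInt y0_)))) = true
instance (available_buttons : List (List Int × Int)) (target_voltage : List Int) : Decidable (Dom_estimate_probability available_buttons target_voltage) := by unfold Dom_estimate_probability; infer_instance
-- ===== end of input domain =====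

-- B inverts A's loops: instead of scanning every active button for every voltage index
-- (O(V·B)), it makes one pass over the buttons incrementing a counts array (O(V + total
-- button size)); measurably faster on large inputs.

-- ===== PORT A =====
def estimate_probability (available_buttons : List (List Int × Int)) (target_voltage : List Int) : List (Int × Int) :=
  -- s = [btn for btn, count in available_buttons.items() if count > 0]
  let s := ((PySem.Dict.ofList available_buttons).items.filter (fun p => p.2 > 0)).map Prod.fst
  -- probs = {}; for i in range(len(target_voltage)): … probs[i] = counter  — fresh keys
  -- appended in order, so the dict is the accumulated list of (i, counter) pairs
  (PySem.List.pyRange 0 (target_voltage.length : Int)).foldl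
    (fun probs i =>
      probs ++ [(i, s.foldl (fun counter btn => if btn.contains i then counter + 1 else counter) 0)])
    []

-- ===== PORT B =====
-- if 0 <= e < V: counts[e] += 1   (the guard puts the index in range, so plain set/getD)
def pvAddIdx (V : Int) (cnts : List Int) (e : Int) : List Int :=
  if 0 ≤ e ∧ e < V then cnts.set e.toNat (cnts.getD e.toNat 0 + 1) else cnts

-- for e in dict.fromkeys(btn): …   (ordered dedup = PySem.List.dedup)
def pvAddBtn (V : Int) (cnts : List Int) (btn : List Int) : List Int :=
  (PySem.List.dedup btn).foldl (pvAddIdx V) cnts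

def estimate_probability_alt (available_buttons : List (List Int × Int)) (target_voltage : List Int) : List (Int × Int) :=
  let V : Int := target_voltage.length
  let counts := (PySem.Dict.ofList available_buttons).items.foldl
    (fun cnts p => if p.2 > 0 then pvAddBtn V cnts p.1 else cnts)
    (List.replicate target_voltage.length 0)
  -- return {i: c for i, c in enumerate(counts)}  — keys 0..V-1 distinct, in order
  PySem.List.enumerate counts 0

-- ===== PRECONDITION & SPEC =====
def Spec_estimate_probability (available_buttons : List (List Int × Int)) (target_voltage : List Int) (out : List (Int × Int)) : Prop := out = estimate_probability_alt available_buttons target_voltage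
instance (available_buttons : List (List Int × Int)) (target_voltage : List Int) (out : List (Int × Int)) : Decidable (Spec_estimate_probability available_buttons target_voltage out) := by unfold Spec_estimate_probability; infer_instance

-- ===== CLAIM (what is proved, stated in full; the proofs are below) =====
def Claim_equal_estimate_probability : Prop := ∀ (available_buttons : List (List Int × Int)) (target_voltage : List Int), Dom_estimate_probability available_buttons target_voltage → Spec_estimate_probability available_buttons target_voltage (estimate_probability available_buttons target_voltage)

-- ===== LEMMAS AND PROOFS =====

theorem pvAddIdx_length (V : Int) (cnts : List Int) (e : Int) :
    (pvAddIdx V cnts e).length = cnts.length := by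
  unfold pvAddIdx; split <;> simp

theorem foldl_pvAddIdx_length (V : Int) (L : List Int) (cnts : List Int) :
    (L.foldl (pvAddIdx V) cnts).length = cnts.length := by
  induction L generalizing cnts with
  | nil => rfl
  | cons e L ih => simp [List.foldl_cons, ih, pvAddIdx_length]

theorem foldl_pvAddIdx_getD (V : Int) (L : List Int) (cnts : List Int) (k : Nat)
    (hk : k < cnts.length) (hkV : (k : Int) < V) (hnd : L.Nodup) :
    (L.foldl (pvAddIdx V) cnts).getD k 0 =
      cnts.getD k 0 + (if (k : Int) ∈ L then 1 else 0) := by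
  induction L generalizing cnts with
  | nil => simp
  | cons e L ih =>
    rcases List.nodup_cons.mp hnd with ⟨he, hnd'⟩
    rw [List.foldl_cons, ih _ (by rw [pvAddIdx_length]; exact hk) hnd']
    by_cases hek : e = (k : Int)
    · have h0 : pvAddIdx V cnts e = cnts.set k (cnts.getD k 0 + 1) := by
        unfold pvAddIdx
        have ht : e.toNat = k := by omega
        rw [if_pos (by omega), ht]
      have hmem : (k : Int) ∉ L := hek ▸ he
      have hin : (k : Int) ∈ e :: L := by rw [hek]; exact List.mem_cons_self
      rw [h0, if_neg hmem, if_pos hin]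
      simp [List.getD_eq_getElem?_getD, hk]
    · have hne : (pvAddIdx V cnts e).getD k 0 = cnts.getD k 0 := by
        unfold pvAddIdx; split
        · have : e.toNat ≠ k := by omega
          simp [List.getD_eq_getElem?_getD, List.getElem?_set_ne this]
        · rfl
      have hmem : ((k : Int) ∈ e :: L) ↔ ((k : Int) ∈ L) := by
        rw [List.mem_cons]
        exact or_iff_right (fun h => hek h.symm)
      rw [hne]
      simp only [hmem]

theorem pvAddBtn_getD (V : Int) (cnts : List Int) (btn : List Int) (k : Nat)
    (hk : k < cnts.length) (hkV : (k : Int) < V) :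
    (pvAddBtn V cnts btn).getD k 0 =
      cnts.getD k 0 + (if btn.contains (k : Int) then 1 else 0) := by
  unfold pvAddBtn
  rw [foldl_pvAddIdx_getD V _ cnts k hk hkV (PySem.List.nodup_dedup btn)]
  simp

theorem pvAddBtn_length (V : Int) (cnts : List Int) (btn : List Int) :
    (pvAddBtn V cnts btn).length = cnts.length := foldl_pvAddIdx_length V _ cnts

theorem outer_fold_getD (V : Int) (ps : List (List Int × Int)) (cnts : List Int) (k : Nat)
    (hk : k < cnts.length) (hkV : (k : Int) < V) :
    (ps.foldl (fun c p => if p.2 > 0 then pvAddBtn V c p.1 else c) cnts).getD k 0 =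
      cnts.getD k 0 +
        (((ps.filter (fun p => p.2 > 0)).map Prod.fst).countP (fun btn => btn.contains (k : Int)) : Int) := by
  induction ps generalizing cnts with
  | nil => simp
  | cons p ps ih =>
    rw [List.foldl_cons]
    by_cases hp : p.2 > 0
    · rw [if_pos hp, ih _ (by rw [pvAddBtn_length]; exact hk),
        pvAddBtn_getD V cnts p.1 k hk hkV,
        List.filter_cons_of_pos (by simpa using hp), List.map_cons, List.countP_cons]
      push_cast
      simp
      ring
    · rw [if_neg hp, ih _ hk,
        List.filter_cons_of_neg (by simpa using hp)]

theorem outer_fold_length (V : Int) (ps : List (List Int × Int)) (cnts : List Int) :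
    (ps.foldl (fun c p => if p.2 > 0 then pvAddBtn V c p.1 else c) cnts).length = cnts.length := by
  induction ps generalizing cnts with
  | nil => rfl
  | cons p ps ih =>
    rw [List.foldl_cons]
    by_cases hp : p.2 > 0 <;> simp [hp, ih, pvAddBtn_length]

-- ===== VERDICT (by name: the statement is the Claim_ definition above) =====
theorem estimate_probability_spec : Claim_equal_estimate_probability := by
  intro ab tv _
  unfold Spec_estimate_probability estimate_probability estimate_probability_alt
  rw [PySem.List.foldl_append_singleton_eq_map, List.nil_append]
  have hlen : (((PySem.Dict.ofList ab).items).foldl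
      (fun cnts p => if p.2 > 0 then pvAddBtn (tv.length : Int) cnts p.1 else cnts)
      (List.replicate tv.length 0)).length = tv.length := by
    rw [outer_fold_length, List.length_replicate]
  apply List.ext_getElem
  · rw [List.length_map, PySem.List.length_pyRange_one, PySem.List.length_enumerate, hlen]
    omega
  · intro k h1 h2
    have hk : k < tv.length := by
      rw [List.length_map, PySem.List.length_pyRange_one] at h1; omega
    rw [List.getElem_map, PySem.List.getElem_pyRange_one, PySem.List.getElem_enumerate]
    have hzk : (0 : Int) + (k : Int) = (k : Int) := by ring
    rw [hzk]
    refine Prod.ext rfl ?_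
    rw [PySem.List.foldl_count_if, zero_add]
    have hkc : k < (((PySem.Dict.ofList ab).items).foldl
        (fun cnts p => if p.2 > 0 then pvAddBtn (tv.length : Int) cnts p.1 else cnts)
        (List.replicate tv.length 0)).length := by rw [hlen]; exact hk
    have hget := outer_fold_getD (tv.length : Int) (PySem.Dict.ofList ab).items
      (List.replicate tv.length 0) k (by simpa using hk) (by exact_mod_cast hk)
    rw [List.getD_eq_getElem?_getD, List.getElem?_eq_getElem hkc] at hget
    simp only [Option.getD_some] at hget
    rw [hget]
    simp
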